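-- pv_equiv track=rewrite | github.com/Sujay3054/aster | examples/technical_analysis.py | _calculate_signal_strength
-- ===== SOURCE A (Python) =====
-- from typing import Dict, List, Optional, Tuple, Any
--
-- def _calculate_signal_strength(signals: Dict[str, str]) -> int:
--     """Calculate signal strength score"""
--     score = 0
--
--     for signal_type, signal_value in signals.items():
--         if signal_value == 'BUY':
--             score += 2
--         elif signal_value == 'SELL':
--             score -= 2
--         elif signal_value == 'OVERSOLD':
--             score += 1
--         elif signal_value == 'OVERBOUGHT':
--             score -= 1
--
--     return score
-- ===== SOURCE B (Python) =====
-- def _calculate_signal_strength(signals):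
--     """Calculate signal strength score"""
--     vals = list(signals.values())
--     return (2 * vals.count('BUY') - 2 * vals.count('SELL')
--             + vals.count('OVERSOLD') - vals.count('OVERBOUGHT'))
-- ===== Notes on version B (the rewrite author's own statement) =====
-- stated objective: alternative
-- what changed: Replaces the single-pass if-elif accumulator with staged counting: count occurrences of each of the four signal values and combine the counts in one closed arithmetic formula.
import Mathlib
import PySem

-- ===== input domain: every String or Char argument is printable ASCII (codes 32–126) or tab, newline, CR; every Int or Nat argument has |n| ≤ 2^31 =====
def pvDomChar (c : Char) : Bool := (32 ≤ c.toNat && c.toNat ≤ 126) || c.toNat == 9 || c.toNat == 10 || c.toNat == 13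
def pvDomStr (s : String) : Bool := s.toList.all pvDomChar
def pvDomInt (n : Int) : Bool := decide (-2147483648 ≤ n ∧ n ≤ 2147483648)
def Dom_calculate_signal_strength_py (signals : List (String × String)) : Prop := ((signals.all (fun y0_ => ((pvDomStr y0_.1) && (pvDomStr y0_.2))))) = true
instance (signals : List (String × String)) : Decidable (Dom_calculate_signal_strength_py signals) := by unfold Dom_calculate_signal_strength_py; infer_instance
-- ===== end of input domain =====

-- B replaces A's single-pass if-elif accumulator with staged counting of the four
-- signal values combined in one arithmetic formula (alternative decomposition).


-- ===== PORT A =====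
def calculate_signal_strength_py (signals : List (String × String)) : Int :=
  signals.foldl (fun score p =>
    if p.2 == "BUY" then score + 2
    else if p.2 == "SELL" then score - 2
    else if p.2 == "OVERSOLD" then score + 1
    else if p.2 == "OVERBOUGHT" then score - 1
    else score) 0

-- ===== PORT B =====
def calculate_signal_strength_py_alt (signals : List (String × String)) : Int :=
  let vals := signals.map Prod.snd
  2 * (PySem.List.count vals "BUY" : Int) - 2 * (PySem.List.count vals "SELL" : Int)
    + (PySem.List.count vals "OVERSOLD" : Int) - (PySem.List.count vals "OVERBOUGHT" : Int)

-- ===== PRECONDITION & SPEC =====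
def Spec_calculate_signal_strength_py (signals : List (String × String)) (out : Int) : Prop := out = calculate_signal_strength_py_alt signals
instance (signals : List (String × String)) (out : Int) : Decidable (Spec_calculate_signal_strength_py signals out) := by unfold Spec_calculate_signal_strength_py; infer_instance

-- ===== CLAIM =====
def Claim_equal_calculate_signal_strength_py : Prop := ∀ (signals : List (String × String)), Dom_calculate_signal_strength_py signals → Spec_calculate_signal_strength_py signals (calculate_signal_strength_py signals)

-- ===== LEMMAS AND PROOFS =====

-- A's fold from any accumulator equals the accumulator plus B's count formula.
theorem pv_fold_eq_counts (signals : List (String × String)) (a : Int) :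
    signals.foldl (fun score p =>
      if p.2 == "BUY" then score + 2
      else if p.2 == "SELL" then score - 2
      else if p.2 == "OVERSOLD" then score + 1
      else if p.2 == "OVERBOUGHT" then score - 1
      else score) a
    = a + calculate_signal_strength_py_alt signals := by
  induction signals generalizing a with
  | nil => simp [calculate_signal_strength_py_alt, PySem.List.count]
  | cons hd tl ih =>
    simp only [List.foldl_cons, ih, calculate_signal_strength_py_alt, List.map_cons,
      PySem.List.count, List.count_cons]
    by_cases h1 : hd.2 == "BUY" <;> by_cases h2 : hd.2 == "SELL" <;>
      by_cases h3 : hd.2 == "OVERSOLD" <;> by_cases h4 : hd.2 == "OVERBOUGHT" <;>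
      simp_all [beq_iff_eq] <;> ring

-- ===== VERDICT =====
theorem calculate_signal_strength_py_spec : Claim_equal_calculate_signal_strength_py := by
  intro signals _
  unfold Spec_calculate_signal_strength_py calculate_signal_strength_py
  simpa using pv_fold_eq_counts signals 0
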